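-- pv_equiv track=rewrite | github.com/Zanilicious/AdventOfCode2023 | day4/day4.py | recalc_cards
-- ===== SOURCE A (Python) =====
-- def recalc_cards(card_list, score_list):
--     for index in range(len(card_list)):
--         if score_list[index] > (len(card_list) - index):
--             for inc in range(index + 1, len(card_list)):
--                 card_list[inc] += 1
--         else:
--             for inc in range(index + 1, score_list[index]):
--                 card_list[inc] += 1
--
--     return card_list
-- ===== SOURCE B (Python) =====
-- def recalc_cards(card_list, score_list):
--     # Difference array of the range increments + one prefix-sum pass (O(n)).
--     # Like A, mutates card_list in place and returns it.
--     n = len(card_list)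
--     diff = [0] * (n + 1)
--     for index in range(n):
--         s = score_list[index]
--         end = n if s > n - index else s
--         lo = index + 1
--         if end > lo:
--             diff[lo] += 1
--             diff[end] -= 1
--     run = 0
--     for i in range(n):
--         run += diff[i]
--         card_list[i] += run
--     return card_list
-- ===== Notes on version B (the rewrite author's own statement) =====
-- stated objective: faster
-- what changed: B replaces A's per-card inner increment loops (O(n^2)) by a difference array of the range increments followed by a single prefix-sum pass (O(n)).
import Mathlib
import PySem

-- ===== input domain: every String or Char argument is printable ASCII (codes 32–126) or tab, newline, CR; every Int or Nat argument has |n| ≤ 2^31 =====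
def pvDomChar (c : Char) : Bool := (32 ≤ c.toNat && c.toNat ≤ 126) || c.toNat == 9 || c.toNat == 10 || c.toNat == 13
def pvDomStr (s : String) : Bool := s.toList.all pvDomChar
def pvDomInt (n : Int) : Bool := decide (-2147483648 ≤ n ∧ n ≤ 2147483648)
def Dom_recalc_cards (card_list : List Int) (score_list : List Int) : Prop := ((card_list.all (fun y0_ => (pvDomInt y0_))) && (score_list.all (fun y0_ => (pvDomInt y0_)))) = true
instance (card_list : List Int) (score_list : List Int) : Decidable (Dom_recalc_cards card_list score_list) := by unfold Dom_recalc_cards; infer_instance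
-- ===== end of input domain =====

-- B replaces A's per-card inner increment loops by a difference array of range increments
-- and a single prefix-sum pass; both mutate card_list in place in Python, the equivalence
-- proved here is about the returned (= final) list.


-- ===== PORT A =====
-- 'card_list[inc] += 1': inc is always in [1, len) here (both ranges keep it below len),
-- so List.set at inc.toNat is exact.
def pyIncAt (cl : List Int) (inc : Int) : List Int :=
  cl.set inc.toNat (cl.getD inc.toNat 0 + 1)

def recalc_cards (card_list : List Int) (score_list : List Int) : List Int :=
  (PySem.List.pyRange 0 card_list.length 1).foldl (fun cl index =>
    -- 'score_list[index]': index ∈ [0, len card_list), in range under Pre_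
    let score := PySem.List.pyGetD score_list index 0
    if score > ((card_list.length : Int) - index) then
      (PySem.List.pyRange (index + 1) card_list.length 1).foldl pyIncAt cl
    else
      (PySem.List.pyRange (index + 1) score 1).foldl pyIncAt cl)
    card_list

-- ===== PORT B =====
def recalc_cards_alt (card_list : List Int) (score_list : List Int) : List Int :=
  let n : Int := card_list.length
  let diff := (PySem.List.pyRange 0 n 1).foldl (fun d index =>
      let s := PySem.List.pyGetD score_list index 0
      let e := if s > n - index then n else s
      let lo := index + 1
      if e > lo then
        let d1 := d.set lo.toNat (d.getD lo.toNat 0 + 1)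
        d1.set e.toNat (d1.getD e.toNat 0 - 1)
      else d)
    (List.replicate (card_list.length + 1) 0)
  ((PySem.List.pyRange 0 n 1).foldl (fun (st : Int × List Int) i =>
      let run := st.1 + diff.getD i.toNat 0
      (run, st.2.set i.toNat (st.2.getD i.toNat 0 + run)))
    ((0 : Int), card_list)).2

-- ===== PRECONDITION & SPEC =====
-- A raises IndexError at score_list[index] when score_list is shorter than card_list
-- (B raises there too); both ports model that lookup with pyGetD, so the equivalence
-- theorem holds on all inputs, and Pre_ marks exactly where the Pythons return.
def Pre_recalc_cards (card_list : List Int) (score_list : List Int) : Prop :=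
  card_list.length ≤ score_list.length
instance (card_list : List Int) (score_list : List Int) : Decidable (Pre_recalc_cards card_list score_list) := by unfold Pre_recalc_cards; infer_instance

def pvWitness_recalc_cards : List Int × List Int := ([1, 1, 1, 1], [2, 3, 0, 1])

def Spec_recalc_cards (card_list : List Int) (score_list : List Int) (out : List Int) : Prop := out = recalc_cards_alt card_list score_list
instance (card_list : List Int) (score_list : List Int) (out : List Int) : Decidable (Spec_recalc_cards card_list score_list out) := by unfold Spec_recalc_cards; infer_instance

-- ===== CLAIM (what is proved, stated in full; the proofs are below) =====
def Claim_equal_recalc_cards : Prop := ∀ (card_list : List Int) (score_list : List Int), Dom_recalc_cards card_list score_list → Pre_recalc_cards card_list score_list → Spec_recalc_cards card_list score_list (recalc_cards card_list score_list)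

-- ===== LEMMAS AND PROOFS =====

-- end of the increment range that card `j` produces (n = len(card_list))
def pvEnd (n : Int) (sl : List Int) (j : Int) : Int :=
  if PySem.List.pyGetD sl j 0 > n - j then n else PySem.List.pyGetD sl j 0

-- number of cards among the first m whose range covers position i
def pvCnt (n : Int) (sl : List Int) (m i : ℕ) : Int :=
  ∑ j ∈ Finset.range m, (if (j : Int) < (i : Int) ∧ (i : Int) < pvEnd n sl (j : Int) then 1 else 0)

-- contribution of card j to diff[k]
def pvD (n : Int) (sl : List Int) (j k : ℕ) : Int :=
  (if (j : Int) + 1 < pvEnd n sl (j : Int) ∧ (j : Int) + 1 = (k : Int) then 1 else 0)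
  - (if (j : Int) + 1 < pvEnd n sl (j : Int) ∧ pvEnd n sl (j : Int) = (k : Int) then 1 else 0)

-- diff[k] after the first m cards
def pvDm (n : Int) (sl : List Int) (m k : ℕ) : Int := ∑ j ∈ Finset.range m, pvD n sl j k

-- A's loop body, rewritten as one range increment up to pvEnd
def stepA (n : Int) (sl : List Int) (cl : List Int) (index : Int) : List Int :=
  (PySem.List.pyRange (index + 1) (pvEnd n sl index) 1).foldl pyIncAt cl

-- B's diff-building loop body
def stepD (n : Int) (sl : List Int) (d : List Int) (index : Int) : List Int :=
  if pvEnd n sl index > index + 1 then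
    let d1 := d.set (index + 1).toNat (d.getD (index + 1).toNat 0 + 1)
    d1.set (pvEnd n sl index).toNat (d1.getD (pvEnd n sl index).toNat 0 - 1)
  else d

-- B's prefix-sum loop body
def stepP (diff : List Int) (st : Int × List Int) (i : Int) : Int × List Int :=
  let run := st.1 + diff.getD i.toNat 0
  (run, st.2.set i.toNat (st.2.getD i.toNat 0 + run))

lemma pvSet_get? (d : List Int) (p : ℕ) (v : Int) (k : ℕ) :
    (d.set p (d.getD p 0 + v))[k]?
      = d[k]?.map (fun x => x + if p = k then v else 0) := by
  rw [List.getElem?_set]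
  by_cases h : p = k
  · subst h
    by_cases hl : p < d.length
    · simp [hl]
    · simp [hl]
  · simp [h]

lemma incRange_get? : ∀ (kk : ℕ) (lo hi : Int), 0 ≤ lo → (hi - lo).toNat = kk →
    ∀ (cl : List Int) (i : ℕ),
    ((PySem.List.pyRange lo hi 1).foldl pyIncAt cl)[i]?
      = cl[i]?.map (fun x => x + if lo ≤ (i : Int) ∧ (i : Int) < hi then 1 else 0) := by
  intro kk
  induction kk with
  | zero =>
    intro lo hi hlo hk cl i
    rw [PySem.List.pyRange_one_eq_nil (by omega), List.foldl_nil]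
    have hni : ¬(lo ≤ (i : Int) ∧ (i : Int) < hi) := by omega
    simp [hni]
  | succ kk ih =>
    intro lo hi hlo hk cl i
    rw [PySem.List.pyRange_one_cons (by omega), List.foldl_cons]
    rw [ih (lo + 1) hi (by omega) (by omega)]
    show (pyIncAt cl lo)[i]?.map _ = _
    unfold pyIncAt
    rw [pvSet_get?]
    cases hci : cl[i]? with
    | none => rfl
    | some x =>
      simp only [Option.map_some, Option.some.injEq]
      have hlh : lo < hi := by omega
      split_ifs <;> omega

lemma recalc_eq (cl0 sl : List Int) :
    recalc_cards cl0 sl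
      = (PySem.List.pyRange 0 (cl0.length : Int) 1).foldl (stepA (cl0.length : Int) sl) cl0 := by
  unfold recalc_cards
  congr 1
  funext cl index
  unfold stepA pvEnd
  by_cases h : PySem.List.pyGetD sl index 0 > (cl0.length : Int) - index <;> simp [h]

lemma stepA_get? (n : Int) (sl cl : List Int) (j : Int) (hj : 0 ≤ j) (i : ℕ) :
    (stepA n sl cl j)[i]?
      = cl[i]?.map (fun x => x + if j + 1 ≤ (i : Int) ∧ (i : Int) < pvEnd n sl j then 1 else 0) := by
  unfold stepA
  rw [incRange_get? (pvEnd n sl j - (j + 1)).toNat (j + 1) (pvEnd n sl j) (by omega) rfl]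

lemma A_loop (n : Int) (sl cl0 : List Int) : ∀ (m : ℕ) (i : ℕ),
    ((PySem.List.pyRange 0 (m : Int) 1).foldl (stepA n sl) cl0)[i]?
      = cl0[i]?.map (fun x => x + pvCnt n sl m i) := by
  intro m
  induction m with
  | zero =>
    intro i
    rw [show ((0 : ℕ) : Int) = 0 by rfl, PySem.List.pyRange_one_eq_nil le_rfl,
      List.foldl_nil]
    simp [pvCnt]
  | succ m ih =>
    intro i
    rw [show ((m + 1 : ℕ) : Int) = (m : Int) + 1 by push_cast; ring]
    rw [PySem.List.pyRange_one_succ_right (Int.natCast_nonneg m), List.foldl_append,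
      List.foldl_cons, List.foldl_nil]
    have h1 := stepA_get? n sl (List.foldl (stepA n sl) cl0 (PySem.List.pyRange 0 (m : Int) 1))
      (m : Int) (Int.natCast_nonneg m) i
    rw [ih i] at h1
    rw [h1]
    cases hci : cl0[i]? with
    | none => rfl
    | some x =>
      simp only [Option.map_some, Option.some.injEq, pvCnt, Finset.sum_range_succ]
      have hind : (if (m : Int) + 1 ≤ (i : Int) ∧ (i : Int) < pvEnd n sl (m : Int)
            then (1 : Int) else 0)
          = (if (m : Int) < (i : Int) ∧ (i : Int) < pvEnd n sl (m : Int) then 1 else 0) := by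
        generalize pvEnd n sl (m : Int) = E
        split_ifs <;> omega
      rw [hind]
      ring

lemma stepD_get? (n : Int) (sl d : List Int) (j k : ℕ) :
    (stepD n sl d (j : Int))[k]?
      = d[k]?.map (fun x => x + pvD n sl j k) := by
  unfold stepD pvD
  by_cases h : pvEnd n sl (j : Int) > (j : Int) + 1
  · rw [if_pos h]
    show ((d.set ((j : Int) + 1).toNat (d.getD ((j : Int) + 1).toNat 0 + 1)).set _
      ((d.set ((j : Int) + 1).toNat (d.getD ((j : Int) + 1).toNat 0 + 1)).getD _ 0 - 1))[k]? = _
    rw [show ∀ a : Int, a - 1 = a + (-1) from fun a => sub_eq_add_neg a 1]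
    rw [pvSet_get?, pvSet_get?]
    cases hdk : d[k]? with
    | none => rfl
    | some x =>
      simp only [Option.map_some, Option.some.injEq]
      revert h
      generalize pvEnd n sl (j : Int) = E
      intro h
      split_ifs <;> omega
  · rw [if_neg h]
    cases hdk : d[k]? with
    | none => rfl
    | some x =>
      simp only [Option.map_some, Option.some.injEq, h, false_and, if_false]
      ring

lemma D_loop (n : Int) (sl d0 : List Int) : ∀ (m : ℕ) (k : ℕ),
    ((PySem.List.pyRange 0 (m : Int) 1).foldl (stepD n sl) d0)[k]?
      = d0[k]?.map (fun x => x + pvDm n sl m k) := by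
  intro m
  induction m with
  | zero =>
    intro k
    rw [show ((0 : ℕ) : Int) = 0 by rfl, PySem.List.pyRange_one_eq_nil le_rfl,
      List.foldl_nil]
    simp [pvDm]
  | succ m ih =>
    intro k
    rw [show ((m + 1 : ℕ) : Int) = (m : Int) + 1 by push_cast; ring]
    rw [PySem.List.pyRange_one_succ_right (Int.natCast_nonneg m), List.foldl_append,
      List.foldl_cons, List.foldl_nil]
    rw [stepD_get?, ih k]
    cases hdk : d0[k]? with
    | none => rfl
    | some x =>
      simp only [Option.map_some, Option.some.injEq, pvDm, Finset.sum_range_succ]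
      ring

lemma P_loop (diff cl0 : List Int) : ∀ m : ℕ,
    (((PySem.List.pyRange 0 (m : Int) 1).foldl (stepP diff) ((0 : Int), cl0)).1
        = ∑ k ∈ Finset.range m, diff.getD k 0)
    ∧ ∀ i : ℕ,
      ((PySem.List.pyRange 0 (m : Int) 1).foldl (stepP diff) ((0 : Int), cl0)).2[i]?
        = cl0[i]?.map (fun x =>
            x + if i < m then ∑ k ∈ Finset.range (i + 1), diff.getD k 0 else 0) := by
  intro m
  induction m with
  | zero =>
    rw [show ((0 : ℕ) : Int) = 0 by rfl, PySem.List.pyRange_one_eq_nil le_rfl]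
    refine ⟨by simp, fun i => ?_⟩
    simp
  | succ m ih =>
    rw [show ((m + 1 : ℕ) : Int) = (m : Int) + 1 by push_cast; ring]
    rw [PySem.List.pyRange_one_succ_right (Int.natCast_nonneg m), List.foldl_append,
      List.foldl_cons, List.foldl_nil]
    obtain ⟨ih1, ih2⟩ := ih
    simp only [stepP, Int.toNat_natCast]
    constructor
    · rw [ih1, Finset.sum_range_succ]
    · intro i
      rw [pvSet_get?, ih2 i, ih1]
      cases hci : cl0[i]? with
      | none => rfl
      | some x =>
        simp only [Option.map_some, Option.some.injEq]
        by_cases him : m = i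
        · subst him
          rw [if_neg (lt_irrefl m), if_pos rfl, if_pos (Nat.lt_succ_self m),
            Finset.sum_range_succ]
          ring
        · rw [if_neg him]
          have hiff : i < m ↔ i < m + 1 := by
            constructor <;> (intro; omega)
          simp only [hiff, add_zero]

lemma sum_ind (N : ℕ) (a : Int) :
    ∑ k ∈ Finset.range N, (if a = (k : Int) then (1 : Int) else 0)
      = if 0 ≤ a ∧ a < (N : Int) then 1 else 0 := by
  induction N with
  | zero => simp
  | succ N ih =>
    rw [Finset.sum_range_succ, ih]
    push_cast
    split_ifs <;> omega

lemma perj (n : Int) (sl : List Int) (j i : ℕ) :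
    ∑ k ∈ Finset.range (i + 1), pvD n sl j k
      = if (j : Int) < (i : Int) ∧ (i : Int) < pvEnd n sl (j : Int) then 1 else 0 := by
  unfold pvD
  rw [Finset.sum_sub_distrib]
  generalize pvEnd n sl (j : Int) = E
  by_cases h : (j : Int) + 1 < E
  · simp only [h, true_and]
    rw [sum_ind, sum_ind]
    push_cast
    split_ifs <;> omega
  · simp only [h, false_and, if_false, Finset.sum_const_zero]
    have hni : ¬((j : Int) < (i : Int) ∧ (i : Int) < E) := by omega
    rw [if_neg hni]
    norm_num

lemma PS_eq_cnt (n : Int) (sl : List Int) (N i : ℕ) :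
    ∑ k ∈ Finset.range (i + 1), pvDm n sl N k = pvCnt n sl N i := by
  unfold pvDm pvCnt
  rw [Finset.sum_comm]
  exact Finset.sum_congr rfl (fun j _ => perj n sl j i)

lemma alt_eq (cl0 sl : List Int) :
    recalc_cards_alt cl0 sl
      = ((PySem.List.pyRange 0 (cl0.length : Int) 1).foldl
          (stepP ((PySem.List.pyRange 0 (cl0.length : Int) 1).foldl (stepD (cl0.length : Int) sl)
            (List.replicate (cl0.length + 1) 0)))
          ((0 : Int), cl0)).2 := rfl

lemma diff_getD (cl0 sl : List Int) (k : ℕ) (hk : k < cl0.length + 1) :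
    ((PySem.List.pyRange 0 (cl0.length : Int) 1).foldl (stepD (cl0.length : Int) sl)
        (List.replicate (cl0.length + 1) 0)).getD k 0
      = pvDm (cl0.length : Int) sl cl0.length k := by
  rw [List.getD_eq_getElem?_getD, D_loop]
  simp [hk]

-- ===== VERDICT (by name: the statement is the Claim_ definition above) =====
theorem recalc_cards_spec : Claim_equal_recalc_cards := by
  intro cl0 sl _ _
  unfold Spec_recalc_cards
  rw [recalc_eq, alt_eq]
  apply List.ext_getElem?_iff.mpr
  intro i
  rw [A_loop, (P_loop _ cl0 cl0.length).2 i]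
  cases hci : cl0[i]? with
  | none => rfl
  | some x =>
    have hi : i < cl0.length := by
      by_contra hh
      rw [List.getElem?_eq_none (show cl0.length ≤ i by omega)] at hci
      simp at hci
    simp only [Option.map_some, Option.some.injEq, if_pos hi]
    have hs : ∑ k ∈ Finset.range (i + 1),
          ((PySem.List.pyRange 0 (cl0.length : Int) 1).foldl (stepD (cl0.length : Int) sl)
            (List.replicate (cl0.length + 1) 0)).getD k 0
        = pvCnt (cl0.length : Int) sl cl0.length i := by
      rw [Finset.sum_congr rfl (fun k hk => diff_getD cl0 sl k
        (by have := Finset.mem_range.mp hk; omega))]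
      exact PS_eq_cnt _ _ _ _
    rw [hs]
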